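-- pv_equiv track=rewrite | github.com/lhs8701/algorithm-study | school/algorithm2/02_sorting(shell, shuffle)/code/HSort.py | hInsertionSort
-- ===== SOURCE A (Python) =====
-- def hInsertionSort(a, h):
--     numSwaps = 0
--     for i in range(h, len(a)):  # Begin from a[h]
--         key = a[i]     # Element to move at current iteration
--         j = i-h
--         while j>=0 and a[j] > key:
--             a[j+h] = a[j]  # Move element a[j] to a[j+h] if a[j] > key
--             numSwaps += 1
--             j -= h         # Decrement j by h
--         a[j+h] = key   # Place the key to the farthest it can go to the left
--     return a, numSwaps
-- ===== SOURCE B (Python) =====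
-- def hInsertionSort(a, h):
--     # Sorts each stride-h subsequence by merge sort, counting inversions
--     # (= the number of element moves the gapped insertion sort performs).
--     if h < 1:
--         return a, 0
--     n = len(a)
--     w = min(h, n)
--     buckets = [[] for _ in range(w)]
--     for i in range(n):
--         buckets[i % w].append(a[i])
--     total = 0
--     for k in range(w):
--         buckets[k], inv = _sortCount(buckets[k])
--         total += inv
--     for i in range(n):
--         a[i] = buckets[i % w][i // w]
--     return a, total
--
--
-- def _mergeCount(l, r):
--     out = []
--     inv = 0
--     i = j = 0
--     while i < len(l) and j < len(r):
--         if l[i] <= r[j]: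
--             out.append(l[i])
--             i += 1
--         else:
--             out.append(r[j])
--             inv += len(l) - i
--             j += 1
--     out.extend(l[i:])
--     out.extend(r[j:])
--     return out, inv
--
--
-- def _sortCount(xs):
--     if len(xs) <= 1:
--         return xs, 0
--     m = len(xs) // 2
--     ls, il = _sortCount(xs[:m])
--     rs, ir = _sortCount(xs[m:])
--     ms, ic = _mergeCount(ls, rs)
--     return ms, il + ir + ic
-- ===== Notes on version B (the rewrite author's own statement) =====
-- stated objective: alternative
-- what changed: Replaces the in-place gapped insertion sort (counting shifts one by one) by extracting each stride-h subsequence into a bucket, sorting each bucket with a merge sort that counts inversions (= the shifts A performs), and reassembling the array.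
import Mathlib
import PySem

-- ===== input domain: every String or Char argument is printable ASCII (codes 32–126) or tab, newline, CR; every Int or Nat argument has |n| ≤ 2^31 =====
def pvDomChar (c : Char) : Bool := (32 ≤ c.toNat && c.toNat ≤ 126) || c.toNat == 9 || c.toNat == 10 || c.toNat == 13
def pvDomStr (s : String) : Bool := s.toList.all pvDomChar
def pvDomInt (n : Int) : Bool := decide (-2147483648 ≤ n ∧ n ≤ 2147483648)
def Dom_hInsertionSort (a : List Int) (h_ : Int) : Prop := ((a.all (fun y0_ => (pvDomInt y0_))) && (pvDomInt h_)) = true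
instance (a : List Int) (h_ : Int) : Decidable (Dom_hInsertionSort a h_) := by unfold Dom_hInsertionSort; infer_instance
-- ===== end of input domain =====

-- B sorts each stride-h subsequence with an inversion-counting merge sort (the inversion
-- count equals the number of element moves A performs) instead of A's in-place gapped
-- insertion; both Pythons mutate `a` in place and return it, and the equivalence proved
-- here is about the returned value.

-- ===== PORT A =====
-- inner `while j>=0 and a[j] > key` loop; fuel bounds the iterations (A's loop makes at
-- most `len(a)` of them on every input admitted by Pre_).
def pvInnerA (key h_ : Int) : Nat → List Int → Int → Int → List Int × Int × Int
  | 0, arr, j, swaps => (arr, j, swaps)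
  | fuel + 1, arr, j, swaps =>
    if 0 ≤ j ∧ key < PySem.List.pyGetD arr j 0 then
      pvInnerA key h_ fuel (PySem.List.pySetD arr (j + h_) (PySem.List.pyGetD arr j 0))
        (j - h_) (swaps + 1)
    else (arr, j, swaps)

def hInsertionSort (a : List Int) (h_ : Int) : List Int × Int :=
  (PySem.List.pyRange h_ (a.length : Int) 1).foldl
    (fun st i =>
      let key := PySem.List.pyGetD st.1 i 0
      let r := pvInnerA key h_ st.1.length st.1 (i - h_) st.2
      (PySem.List.pySetD r.1 (r.2.1 + h_) key, r.2.2))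
    (a, 0)

-- ===== PORT B =====
def pvMergeCnt : List Int → List Int → List Int × Int
  | [], r => (r, 0)
  | x :: l, [] => (x :: l, 0)
  | x :: l, y :: r =>
    if x ≤ y then
      let m := pvMergeCnt l (y :: r)
      (x :: m.1, m.2)
    else
      let m := pvMergeCnt (x :: l) r
      (y :: m.1, m.2 + ((x :: l).length : Int))
termination_by l r => l.length + r.length

def pvSortCnt (xs : List Int) : List Int × Int :=
  if xs.length ≤ 1 then (xs, 0)
  else
    let m := xs.length / 2
    let ls := pvSortCnt (xs.take m)
    let rs := pvSortCnt (xs.drop m)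
    let ms := pvMergeCnt ls.1 rs.1
    (ms.1, ls.2 + rs.2 + ms.2)
termination_by xs.length
decreasing_by
  · simp only [List.length_take]; omega
  · simp only [List.length_drop]; omega

def hInsertionSort_alt (a : List Int) (h_ : Int) : List Int × Int :=
  if h_ < 1 then (a, 0)
  else
    let n := a.length
    let w := min h_.toNat n
    let buckets := (List.range n).foldl
      (fun bs i => bs.set (i % w) (bs.getD (i % w) [] ++ [a.getD i 0]))
      (List.replicate w ([] : List Int))
    let res := (List.range w).foldl
      (fun st k =>
        let r := pvSortCnt (st.1.getD k [])
        (st.1.set k r.1, st.2 + r.2))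
      (buckets, (0 : Int))
    ((List.range n).map (fun i => (res.1.getD (i % w) []).getD (i / w) 0), res.2)

-- ===== PRECONDITION & SPEC =====
-- For h < 0 Python A always raises IndexError (the last pass reads a[len(a)-1-h], past the
-- end; on an empty list a[h] already fails); Pre_ excludes exactly those inputs.
def Pre_hInsertionSort (a : List Int) (h_ : Int) : Prop := 0 ≤ h_
instance (a : List Int) (h_ : Int) : Decidable (Pre_hInsertionSort a h_) := by
  unfold Pre_hInsertionSort; infer_instance

def pvWitness_hInsertionSort : List Int × Int := ([3, 1, 2, 5, 4], 2)

def Spec_hInsertionSort (a : List Int) (h_ : Int) (out : List Int × Int) : Prop := out = hInsertionSort_alt a h_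
instance (a : List Int) (h_ : Int) (out : List Int × Int) : Decidable (Spec_hInsertionSort a h_ out) := by unfold Spec_hInsertionSort; infer_instance

-- ===== CLAIM (what is proved, stated in full; the proofs are below) =====
def Claim_equal_hInsertionSort : Prop := ∀ (a : List Int) (h_ : Int), Dom_hInsertionSort a h_ → Pre_hInsertionSort a h_ → Spec_hInsertionSort a h_ (hInsertionSort a h_)

-- ===== LEMMAS AND PROOFS =====

-- stride-class ('a[c::h]') toolkit

def pvStrided (h : Nat) : List Int → List Int
  | [] => []
  | x :: xs => x :: pvStrided h (xs.drop (h - 1))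
termination_by l => l.length
decreasing_by simp only [List.length_drop, List.length_cons]; omega

def pvCls (l : List Int) (h c : Nat) : List Int := pvStrided h (l.drop c)

theorem pvCls_nil (l : List Int) (h c : Nat) (hc : l.length ≤ c) : pvCls l h c = [] := by
  unfold pvCls
  rw [List.drop_eq_nil_of_le hc, pvStrided]

theorem pvCls_cons (l : List Int) (h c : Nat) (hh : 1 ≤ h) (hc : c < l.length) :
    pvCls l h c = l.getD c 0 :: pvCls l h (c + h) := by
  unfold pvCls
  rw [List.drop_eq_getElem_cons hc, pvStrided, List.drop_drop]
  have h1 : c + 1 + (h - 1) = c + h := by omega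
  rw [h1, List.getD_eq_getElem l 0 hc]

theorem pvCls_len_iff (l : List Int) (h : Nat) (hh : 1 ≤ h) :
    ∀ (k c : Nat), k < (pvCls l h c).length ↔ c + k * h < l.length := by
  intro k
  induction k with
  | zero =>
    intro c
    by_cases hc : c < l.length
    · rw [pvCls_cons l h c hh hc]; simp [hc]
    · rw [pvCls_nil l h c (by omega)]; simp; omega
  | succ k ih =>
    intro c
    have hm : (k + 1) * h = k * h + h := by ring
    by_cases hc : c < l.length
    · rw [pvCls_cons l h c hh hc]
      simp only [List.length_cons, Nat.add_lt_add_iff_right]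
      rw [ih (c + h)]
      omega
    · rw [pvCls_nil l h c (by omega)]
      simp
      omega

theorem pvCls_getD (l : List Int) (h : Nat) (hh : 1 ≤ h) :
    ∀ (k c : Nat), c + k * h < l.length → (pvCls l h c).getD k 0 = l.getD (c + k * h) 0 := by
  intro k
  induction k with
  | zero =>
    intro c hck
    simp only [Nat.zero_mul, Nat.add_zero] at hck ⊢
    rw [pvCls_cons l h c hh hck]
    rfl
  | succ k ih =>
    intro c hck
    have hm : (k + 1) * h = k * h + h := by ring
    have hc : c < l.length := by omega
    rw [pvCls_cons l h c hh hc]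
    simp only [List.getD_cons_succ]
    rw [ih (c + h) (by omega)]
    have h2 : c + h + k * h = c + (k + 1) * h := by omega
    rw [h2]

-- getD-based extensionality
theorem pvListExt {l m : List Int} (hlen : l.length = m.length)
    (hg : ∀ p, p < l.length → l.getD p 0 = m.getD p 0) : l = m := by
  apply List.ext_getElem hlen
  intro i h1 h2
  have := hg i h1
  rwa [List.getD_eq_getElem l 0 h1, List.getD_eq_getElem m 0 h2] at this

theorem pvLenEq {m m' : Nat} (h : ∀ k, k < m ↔ k < m') : m = m' := by
  rcases Nat.lt_trichotomy m m' with h1 | h1 | h1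
  · have := (h m).mpr h1; omega
  · exact h1
  · have := (h m').mp h1; omega

theorem pvGetD_take (l : List Int) (i p : Nat) (hp : p < i) :
    (l.take i).getD p 0 = l.getD p 0 := by
  by_cases hl : p < l.length
  · have h2 : p < (l.take i).length := by simp [List.length_take]; omega
    rw [List.getD_eq_getElem _ 0 h2, List.getD_eq_getElem _ 0 hl, List.getElem_take]
  · rw [List.getD_eq_default _ 0 (by simp [List.length_take]; omega),
        List.getD_eq_default _ 0 (by omega)]

theorem pvGetD_set (l : List Int) (p q : Nat) (x : Int) (hp : p < l.length) :
    (l.set p x).getD q 0 = if p = q then x else l.getD q 0 := by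
  by_cases hq : q < l.length
  · rw [List.getD_eq_getElem _ 0 (by simpa using hq)]
    rw [List.getElem_set]
    split
    · rfl
    · rw [List.getD_eq_getElem _ 0 hq]
  · rw [List.getD_eq_default _ 0 (by simpa using hq), List.getD_eq_default _ 0 (by omega)]
    split
    · omega
    · rfl


theorem pvCls_take_len_iff (l : List Int) (h c i : Nat) (hh : 1 ≤ h) (hi : i ≤ l.length) :
    ∀ k, (k < (pvCls (l.take i) h c).length ↔ c + k * h < i) := by
  intro k
  rw [pvCls_len_iff _ h hh, List.length_take]
  omega

-- setting position c + k0*h rewrites entry k0 of class c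
theorem pvCls_set_same (l : List Int) (h c k0 : Nat) (x : Int) (hh : 1 ≤ h)
    (hp : c + k0 * h < l.length) :
    pvCls (l.set (c + k0 * h) x) h c = (pvCls l h c).set k0 x := by
  apply pvListExt
  · apply pvLenEq
    intro k
    have e1 := pvCls_len_iff (l.set (c + k0 * h) x) h hh k c
    have e2 := pvCls_len_iff l h hh k c
    simp only [List.length_set] at e1 ⊢
    rw [e1, e2]
  · intro p hp2
    have hp3 : c + p * h < l.length := by
      have := pvCls_len_iff (l.set (c + k0 * h) x) h hh p c
      simp only [List.length_set] at this
      rw [← this]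
      exact hp2
    rw [pvCls_getD _ h hh p c (by simpa using hp3)]
    rw [pvGetD_set l (c + k0 * h) (c + p * h) x hp]
    rw [pvGetD_set (pvCls l h c) k0 p x (by rw [pvCls_len_iff _ h hh]; exact hp)]
    have hiff : c + k0 * h = c + p * h ↔ k0 = p := by
      constructor
      · intro he
        exact Nat.eq_of_mul_eq_mul_right (show 0 < h by omega) (Nat.add_left_cancel he)
      · intro he; rw [he]
    by_cases he : k0 = p
    · rw [if_pos (hiff.mpr he), if_pos he]
    · rw [if_neg (fun hh2 => he (hiff.mp hh2)), if_neg he]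
      exact (pvCls_getD l h hh p c hp3).symm

-- setting a position in another residue class leaves class c unchanged
theorem pvCls_set_other (l : List Int) (h c p : Nat) (x : Int) (hh : 1 ≤ h)
    (hc : c < h) (hne : p % h ≠ c) :
    pvCls (l.set p x) h c = pvCls l h c := by
  apply pvListExt
  · apply pvLenEq
    intro k
    have e1 := pvCls_len_iff (l.set p x) h hh k c
    have e2 := pvCls_len_iff l h hh k c
    simp only [List.length_set] at e1
    rw [e1, e2]
  · intro q hq
    have hq2 : c + q * h < l.length := by
      have := pvCls_len_iff (l.set p x) h hh q c
      simp only [List.length_set] at this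
      rw [← this]; exact hq
    rw [pvCls_getD _ h hh q c (by simpa using hq2), pvCls_getD l h hh q c hq2]
    by_cases hpl : p < l.length
    · rw [pvGetD_set l p (c + q * h) x hpl]
      rw [if_neg]
      intro he
      apply hne
      rw [he, Nat.add_mul_mod_self_right, Nat.mod_eq_of_lt hc]
    · rw [List.set_eq_of_length_le (by omega)]

theorem pvCls_take_len_self (l : List Int) (h i : Nat) (hh : 1 ≤ h) (hi : i ≤ l.length) :
    (pvCls (l.take i) h (i % h)).length = i / h := by
  apply pvLenEq
  intro k
  rw [pvCls_take_len_iff l h (i % h) i hh hi]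
  have hd := Nat.mod_add_div' i h
  constructor
  · intro hk
    by_contra hk2
    have h1 : (i / h) * h ≤ k * h := Nat.mul_le_mul_right h (by omega)
    omega
  · intro hk
    have h1 : (k + 1) * h ≤ (i / h) * h := Nat.mul_le_mul_right h (by omega)
    have h2 : (k + 1) * h = k * h + h := by ring
    omega

theorem pvCls_take_len_self_succ (l : List Int) (h i : Nat) (hh : 1 ≤ h) (hi : i < l.length) :
    (pvCls (l.take (i + 1)) h (i % h)).length = i / h + 1 := by
  apply pvLenEq
  intro k
  rw [pvCls_take_len_iff l h (i % h) (i + 1) hh (by omega)]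
  have hd := Nat.mod_add_div' i h
  constructor
  · intro hk
    by_contra hk2
    have h1 : (i / h + 1) * h ≤ k * h := Nat.mul_le_mul_right h (by omega)
    have h2 : (i / h + 1) * h = (i / h) * h + h := by ring
    omega
  · intro hk
    have h1 : k * h ≤ (i / h) * h := Nat.mul_le_mul_right h (by omega)
    omega

-- extending the prefix by one element of class c appends that element
theorem pvCls_take_succ_same (l : List Int) (h i : Nat) (hh : 1 ≤ h) (hi : i < l.length) :
    pvCls (l.take (i + 1)) h (i % h) = pvCls (l.take i) h (i % h) ++ [l.getD i 0] := by
  have hq := pvCls_take_len_self l h i hh (by omega)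
  have hq1 := pvCls_take_len_self_succ l h i hh hi
  have hd := Nat.mod_add_div' i h
  apply pvListExt
  · simp [hq, hq1]
  · intro p hp
    rw [hq1] at hp
    have hple : i % h + p * h ≤ i := by
      have h2 : p * h ≤ (i / h) * h := Nat.mul_le_mul_right h (by omega)
      omega
    rw [pvCls_getD _ h hh p _ (by simp only [List.length_take]; omega)]
    rw [pvGetD_take l (i + 1) _ (by omega)]
    by_cases hpk : p < i / h
    · have h2 : p * h < (i / h) * h := Nat.mul_lt_mul_of_lt_of_le hpk (le_refl h) (by omega)
      rw [List.getD_append _ _ _ _ (by omega)]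
      rw [pvCls_getD _ h hh p _ (by simp only [List.length_take]; omega)]
      rw [pvGetD_take l i _ (by omega)]
    · have hpe : p = i / h := by omega
      subst hpe
      rw [List.getD_append_right _ _ _ _ (by omega), hq]
      simp only [Nat.sub_self, List.getD_cons_zero]
      congr 1

-- extending the prefix by an element of another class changes nothing
theorem pvCls_take_succ_other (l : List Int) (h c i : Nat) (hh : 1 ≤ h) (hc : c < h)
    (hne : i % h ≠ c) :
    pvCls (l.take (i + 1)) h c = pvCls (l.take i) h c := by
  have hmod : ∀ k : Nat, (c + k * h) % h = c := by
    intro k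
    rw [Nat.add_mul_mod_self_right, Nat.mod_eq_of_lt hc]
  apply pvListExt
  · apply pvLenEq
    intro k
    rw [pvCls_len_iff _ h hh, pvCls_len_iff _ h hh, List.length_take, List.length_take]
    have := hmod k
    constructor
    · intro h1
      have h2 : c + k * h ≠ i := fun he => hne (by rw [← he, this])
      omega
    · intro h1; omega
  · intro p hp
    rw [pvCls_len_iff _ h hh, List.length_take] at hp
    have h2 : c + p * h ≠ i := fun he => hne (by rw [← he, hmod p])
    rw [pvCls_getD _ h hh p c (by simp only [List.length_take]; omega),
        pvCls_getD _ h hh p c (by simp only [List.length_take]; omega)]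
    rw [pvGetD_take l (i+1) _ (by omega), pvGetD_take l i _ (by omega)]

-- inversion counting and the merge/sort specs
def pvInv : List Int → Nat
  | [] => 0
  | x :: xs => xs.countP (fun y => decide (y < x)) + pvInv xs

def pvCross (l r : List Int) : Nat := (l.map (fun x => r.countP (fun y => decide (y < x)))).sum

theorem pvCross_nil (l : List Int) : pvCross l [] = 0 := by
  simp [pvCross]

theorem pvCross_cons_left (x : Int) (l r : List Int) :
    pvCross (x :: l) r = r.countP (fun y => decide (y < x)) + pvCross l r := by
  simp [pvCross]

theorem pvCross_cons_right (l : List Int) (y : Int) (r : List Int) :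
    pvCross l (y :: r) = l.countP (fun x => decide (y < x)) + pvCross l r := by
  induction l with
  | nil => simp [pvCross]
  | cons z zs ih =>
    rw [pvCross_cons_left, pvCross_cons_left, ih, List.countP_cons, List.countP_cons]
    by_cases hyz : y < z <;> simp [hyz] <;> omega

theorem pvInv_append (l r : List Int) : pvInv (l ++ r) = pvInv l + pvInv r + pvCross l r := by
  induction l with
  | nil => simp [pvInv, pvCross]
  | cons x l ih =>
    simp only [List.cons_append, pvInv, List.countP_append, ih, pvCross_cons_left]
    omega

theorem pvInv_concat (xs : List Int) (x : Int) :
    pvInv (xs ++ [x]) = pvInv xs + xs.countP (fun y => decide (x < y)) := by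
  rw [pvInv_append]
  have h1 : pvInv [x] = 0 := by simp [pvInv]
  have h2 : pvCross xs [x] = xs.countP (fun y => decide (x < y)) := by
    induction xs with
    | nil => simp [pvCross]
    | cons z zs ih =>
      rw [pvCross_cons_left, ih, List.countP_cons]
      simp only [List.countP_cons, List.countP_nil]
      by_cases hxz : x < z <;> simp [hxz] <;> omega
  omega

theorem pvCross_perm_left {l l' : List Int} (r : List Int) (hp : l.Perm l') :
    pvCross l r = pvCross l' r :=
  List.Perm.sum_eq (hp.map _)

theorem pvCross_perm_right (l : List Int) {r r' : List Int} (hp : r.Perm r') :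
    pvCross l r = pvCross l r' := by
  unfold pvCross
  congr 1
  exact List.map_congr_left (fun x _ => hp.countP_eq _)

theorem pvMergeCnt_spec : ∀ l r : List Int, l.Pairwise (· ≤ ·) → r.Pairwise (· ≤ ·) →
    (pvMergeCnt l r).1.Pairwise (· ≤ ·) ∧ (pvMergeCnt l r).1.Perm (l ++ r) ∧
      (pvMergeCnt l r).2 = (pvCross l r : Int) := by
  intro l r
  induction l, r using pvMergeCnt.induct with
  | case1 r =>
    intro _ hr
    simp [pvMergeCnt, hr, pvCross]
  | case2 x l =>
    intro hl _
    simp [pvMergeCnt, hl, pvCross_nil]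
  | case3 x l y r hxy ih =>
    intro hl hr
    have hval : pvMergeCnt (x :: l) (y :: r) =
        (x :: (pvMergeCnt l (y :: r)).1, (pvMergeCnt l (y :: r)).2) := by
      rw [pvMergeCnt]; simp [hxy]
    obtain ⟨s1, s2, s3⟩ := ih hl.of_cons hr
    rw [hval]
    refine ⟨?_, ?_, ?_⟩
    · rw [List.pairwise_cons]
      refine ⟨?_, s1⟩
      intro b hb
      have hb2 : b ∈ l ++ y :: r := s2.mem_iff.mp hb
      rcases List.mem_append.mp hb2 with h | h
      · exact List.rel_of_pairwise_cons hl h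
      · rcases List.mem_cons.mp h with h | h
        · omega
        · have := List.rel_of_pairwise_cons hr h
          omega
    · exact List.Perm.cons x s2
    · simp only [s3]
      have hz : List.countP (fun z => decide (z < x)) (y :: r) = 0 := by
        rw [List.countP_eq_zero]
        intro z hz
        rcases List.mem_cons.mp hz with h | h
        · simp; omega
        · have := List.rel_of_pairwise_cons hr h
          simp; omega
      rw [pvCross_cons_left, hz]
      simp
  | case4 x l y r hxy ih =>
    intro hl hr
    have hval : pvMergeCnt (x :: l) (y :: r) =
        (y :: (pvMergeCnt (x :: l) r).1,
          (pvMergeCnt (x :: l) r).2 + ((x :: l).length : Int)) := by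
      rw [pvMergeCnt]; simp [hxy]
    obtain ⟨s1, s2, s3⟩ := ih hl hr.of_cons
    rw [hval]
    refine ⟨?_, ?_, ?_⟩
    · rw [List.pairwise_cons]
      refine ⟨?_, s1⟩
      intro b hb
      have hb2 : b ∈ (x :: l) ++ r := s2.mem_iff.mp hb
      rcases List.mem_append.mp hb2 with h | h
      · rcases List.mem_cons.mp h with h | h
        · omega
        · have := List.rel_of_pairwise_cons hl h
          omega
      · exact List.rel_of_pairwise_cons hr h
    · exact (s2.cons y).trans List.perm_middle.symm
    · rw [s3, pvCross_cons_right]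
      have hlen : List.countP (fun z => decide (y < z)) (x :: l) = (x :: l).length := by
        rw [List.countP_eq_length]
        intro z hz
        rcases List.mem_cons.mp hz with h | h
        · simp; omega
        · have := List.rel_of_pairwise_cons hl h
          simp; omega
      rw [hlen]
      push_cast
      ring

theorem pvSortCnt_spec : ∀ xs : List Int,
    (pvSortCnt xs).1.Pairwise (· ≤ ·) ∧ (pvSortCnt xs).1.Perm xs ∧
      (pvSortCnt xs).2 = (pvInv xs : Int) := by
  intro xs
  induction xs using pvSortCnt.induct with
  | case1 xs hle =>
    rw [pvSortCnt, if_pos hle]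
    match xs, hle with
    | [], _ => simp [pvInv]
    | [x], _ => simp [pvInv]
  | case2 xs hle m ih1 ih2 =>
    have hval : pvSortCnt xs =
        ((pvMergeCnt (pvSortCnt (xs.take (xs.length / 2))).1
            (pvSortCnt (xs.drop (xs.length / 2))).1).1,
          (pvSortCnt (xs.take (xs.length / 2))).2 + (pvSortCnt (xs.drop (xs.length / 2))).2 +
            (pvMergeCnt (pvSortCnt (xs.take (xs.length / 2))).1
              (pvSortCnt (xs.drop (xs.length / 2))).1).2) := by
      rw [pvSortCnt]; simp [hle]
    obtain ⟨a1, a2, a3⟩ := ih1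
    obtain ⟨b1, b2, b3⟩ := ih2
    obtain ⟨m1, m2, m3⟩ := pvMergeCnt_spec _ _ a1 b1
    rw [hval]
    refine ⟨m1, ?_, ?_⟩
    · refine m2.trans ((a2.append b2).trans ?_)
      rw [List.take_append_drop]
    · have hx : pvInv xs = pvInv (xs.take (xs.length / 2)) + pvInv (xs.drop (xs.length / 2)) +
          pvCross (xs.take (xs.length / 2)) (xs.drop (xs.length / 2)) := by
        conv_lhs => rw [← List.take_append_drop (xs.length / 2) xs]
        rw [pvInv_append]
      rw [m3, a3, b3, pvCross_perm_left _ a2, pvCross_perm_right _ b2, hx]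
      push_cast
      ring

-- sorted-split and small list algebra

theorem pvDrop_eq_getD_cons (S : List Int) (m : Nat) (hm : m < S.length) :
    S.drop m = S.getD m 0 :: S.drop (m + 1) := by
  rw [List.drop_eq_getElem_cons hm, List.getD_eq_getElem _ 0 hm]

theorem pvTake_succ_eq (S : List Int) (m : Nat) (hm : m < S.length) :
    S.take (m + 1) = S.take m ++ [S.getD m 0] := by
  rw [List.take_succ, List.getElem?_eq_getElem hm, List.getD_eq_getElem _ 0 hm]
  rfl

theorem pvSet_at_append (l : List Int) (w v : Int) (r : List Int) :
    (l ++ w :: r).set l.length v = l ++ v :: r := by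
  rw [List.set_append]
  simp

theorem pvSet_at_append' (l : List Int) (w v : Int) (r : List Int) (m : Nat)
    (hm : m = l.length) : (l ++ w :: r).set m v = l ++ v :: r := by
  subst hm; exact pvSet_at_append l w v r

-- sorted split: the elements greater than key are exactly the last t entries
theorem pvSortedSplit (key : Int) : ∀ S : List Int, S.Pairwise (· ≤ ·) →
    (∀ i, i < S.length - S.countP (fun x => decide (key < x)) → S.getD i 0 ≤ key) ∧
    (∀ i, S.length - S.countP (fun x => decide (key < x)) ≤ i → i < S.length →
      key < S.getD i 0) := by
  intro S
  induction S with
  | nil => simp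
  | cons x xs ih =>
    intro hp
    rw [List.pairwise_cons] at hp
    obtain ⟨hx, hxs⟩ := hp
    obtain ⟨iha, ihb⟩ := ih hxs
    have htle : xs.countP (fun x => decide (key < x)) ≤ xs.length := List.countP_le_length
    by_cases hk : key < x
    · have hall : (x :: xs).countP (fun x => decide (key < x)) = (x :: xs).length := by
        rw [List.countP_eq_length]
        intro z hz
        rcases List.mem_cons.mp hz with h | h
        · simp [h]; omega
        · have := hx z h
          simp; omega
      rw [hall]
      refine ⟨fun i hi => absurd hi (by omega), fun i _ hi => ?_⟩
      match i with
      | 0 => simpa using hk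
      | i + 1 =>
        simp only [List.getD_cons_succ]
        have hilen : i < xs.length := by simpa using hi
        have hmem : xs.getD i 0 ∈ xs := by
          rw [List.getD_eq_getElem _ 0 hilen]; exact List.getElem_mem hilen
        have := hx _ hmem
        omega
    · have hcnt : (x :: xs).countP (fun x => decide (key < x))
          = xs.countP (fun x => decide (key < x)) := by
        rw [List.countP_cons]
        simp [hk]
      rw [hcnt]
      constructor
      · intro i hi
        match i with
        | 0 => simp; omega
        | i + 1 =>
          simp only [List.getD_cons_succ]
          apply iha
          simp at hi
          omega
      · intro i hi1 hi2
        match i with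
        | 0 => simp at hi1; omega
        | i + 1 =>
          simp only [List.getD_cons_succ]
          apply ihb <;> simp at hi1 hi2 <;> omega


-- the inner while loop: performs exactly t shifts inside class c
theorem pvInnerA_spec
    (H c k t n : Nat) (key : Int) (S T : List Int)
    (hH : 1 ≤ H) (hc : c < H) (hk : 1 ≤ k)
    (hSlen : S.length = k)
    (hsorted : S.Pairwise (· ≤ ·))
    (ht : t = S.countP (fun x => decide (key < x)))
    (hin : c + k * H < n) :
    ∀ fuel s (arr : List Int) (swaps : Int),
      s ≤ t → arr.length = n → t - s < fuel →
      pvCls arr H c = (if s = 0 then S ++ key :: T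
                       else S.take (k + 1 - s) ++ (S.drop (k - s) ++ T)) →
      ∃ arr' : List Int,
        pvInnerA key (H : Int) fuel arr ((c : Int) + ((k : Int) - 1 - (s : Int)) * (H : Int)) swaps
          = (arr', (c : Int) + ((k : Int) - 1 - (t : Int)) * (H : Int), swaps + ((t - s : Nat) : Int)) ∧
        arr'.length = n ∧
        pvCls arr' H c = (if t = 0 then S ++ key :: T
                          else S.take (k + 1 - t) ++ (S.drop (k - t) ++ T)) ∧
        ∀ c', c' < H → c' ≠ c → pvCls arr' H c' = pvCls arr H c' := by
  have htk : t ≤ k := by rw [ht, ← hSlen]; exact List.countP_le_length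
  obtain ⟨hsplA, hsplB⟩ := pvSortedSplit key S hsorted
  intro fuel
  induction fuel with
  | zero => intro s arr swaps hs _ hfuel _; omega
  | succ fuel ih =>
    intro s arr swaps hs hlen hfuel hcls
    have hmul : ∀ a b : Nat, a ≤ b → a * H ≤ b * H := fun a b hab => Nat.mul_le_mul_right H hab
    -- the value A reads at position j (defined whenever s ≤ t < ... and s < k)
    by_cases hst : s < t
    · -- one more shift
      have hsk : s < k := by omega
      have hjnat : (c : Int) + ((k : Int) - 1 - (s : Int)) * (H : Int)
          = ((c + (k - 1 - s) * H : Nat) : Int) := by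
        push_cast
        have h1 : ((k - 1 - s : Nat) : Int) = (k : Int) - 1 - (s : Int) := by omega
        rw [h1]
      have hpos : c + (k - 1 - s) * H < n := by
        have := hmul (k - 1 - s) k (by omega)
        omega
      have hval : PySem.List.pyGetD arr ((c : Int) + ((k : Int) - 1 - (s : Int)) * (H : Int)) 0
          = S.getD (k - 1 - s) 0 := by
        rw [hjnat, PySem.List.pyGetD_natCast, ← pvCls_getD arr H hH (k - 1 - s) c (by omega), hcls]
        by_cases hs0 : s = 0
        · subst hs0
          rw [if_pos rfl]
          rw [List.getD_append _ _ _ _ (by simp only [hSlen]; omega)]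
        · rw [if_neg hs0]
          rw [List.getD_append _ _ _ _ (by
            simp only [List.length_take, hSlen]
            omega)]
          rw [pvGetD_take S _ _ (by omega)]
      have hcond : (0 : Int) ≤ (c : Int) + ((k : Int) - 1 - (s : Int)) * (H : Int) ∧
          key < PySem.List.pyGetD arr ((c : Int) + ((k : Int) - 1 - (s : Int)) * (H : Int)) 0 := by
        constructor
        · rw [hjnat]; positivity
        · rw [hval]
          apply hsplB
          · rw [hSlen, ← ht]; omega
          · omega
      rw [pvInnerA, if_pos hcond]
      -- the write position
      have hwnat : (c : Int) + ((k : Int) - 1 - (s : Int)) * (H : Int) + (H : Int)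
          = ((c + (k - s) * H : Nat) : Int) := by
        push_cast
        have h1 : ((k - s : Nat) : Int) = (k : Int) - (s : Int) := by omega
        rw [h1]; ring
      have hwpos : c + (k - s) * H < n := by
        have := hmul (k - s) k (by omega)
        omega
      set v := S.getD (k - 1 - s) 0 with hv
      have harr1 : PySem.List.pySetD arr
            ((c : Int) + ((k : Int) - 1 - (s : Int)) * (H : Int) + (H : Int))
            (PySem.List.pyGetD arr ((c : Int) + ((k : Int) - 1 - (s : Int)) * (H : Int)) 0)
          = arr.set (c + (k - s) * H) v := by
        rw [hval, hwnat, PySem.List.pySetD_natCast]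
      rw [harr1]
      have hlen1 : (arr.set (c + (k - s) * H) v).length = n := by
        simp [hlen]
      have hcls1 : pvCls (arr.set (c + (k - s) * H) v) H c
          = (if s + 1 = 0 then S ++ key :: T
             else S.take (k + 1 - (s + 1)) ++ (S.drop (k - (s + 1)) ++ T)) := by
        rw [if_neg (by omega)]
        rw [pvCls_set_same arr H c (k - s) v hH (by omega), hcls]
        by_cases hs0 : s = 0
        · subst hs0
          rw [if_pos rfl]
          simp only [Nat.sub_zero]
          have h1 : (S ++ key :: T).set k v = S ++ v :: T := by
            rw [← hSlen, pvSet_at_append]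
          have h2 : S.drop (k - 1) = v :: S.drop k := by
            rw [pvDrop_eq_getD_cons S (k - 1) (by omega)]
            have h3 : k - 1 + 1 = k := by omega
            rw [h3, hv]
            norm_num
          have h4 : S.take (k + 1 - 1) = S := by
            rw [List.take_of_length_le (by omega)]
          have h5 : S.drop k = [] := List.drop_eq_nil_of_le (by omega)
          rw [h1, h4, h2, h5]
          simp
        · rw [if_neg hs0]
          have h1 : k + 1 - s = (k - s) + 1 := by omega
          rw [h1, pvTake_succ_eq S (k - s) (by omega)]
          rw [List.set_append]
          simp only [List.length_append, List.length_take, hSlen, List.length_cons]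
          rw [if_pos (by simp [List.length_take, hSlen] <;> omega)]
          have h2 : (S.take (k - s) ++ [S.getD (k - s) 0]).set (k - s) v
              = S.take (k - s) ++ [v] :=
            pvSet_at_append' _ _ _ _ _ (by simp [List.length_take, hSlen] <;> omega)
          rw [h2]
          have h4 : S.drop (k - (s + 1)) = v :: S.drop (k - s) := by
            rw [pvDrop_eq_getD_cons S (k - (s + 1)) (by omega)]
            have h5 : k - (s + 1) + 1 = k - s := by omega
            have h6 : k - (s + 1) = k - 1 - s := by omega
            rw [h5, h6, hv]
          rw [h4]
          simp
      have hnext : (c : Int) + ((k : Int) - 1 - (s : Int)) * (H : Int) - (H : Int)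
          = (c : Int) + ((k : Int) - 1 - ((s + 1 : Nat) : Int)) * (H : Int) := by
        push_cast; ring
      rw [hnext]
      obtain ⟨arr', he, hl', hc', ho'⟩ :=
        ih (s + 1) (arr.set (c + (k - s) * H) v) (swaps + 1) (by omega) hlen1 (by omega) hcls1
      refine ⟨arr', ?_, hl', hc', ?_⟩
      · rw [he]
        have : swaps + 1 + ((t - (s + 1) : Nat) : Int) = swaps + ((t - s : Nat) : Int) := by
          omega
        rw [this]
      · intro c' hc'2 hne
        rw [ho' c' hc'2 hne]
        apply pvCls_set_other arr H c' (c + (k - s) * H) v hH hc'2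
        rw [Nat.add_mul_mod_self_right, Nat.mod_eq_of_lt hc]
        omega
    · -- loop exits: s = t
      have hseq : s = t := by omega
      have hcond : ¬ ((0 : Int) ≤ (c : Int) + ((k : Int) - 1 - (s : Int)) * (H : Int) ∧
          key < PySem.List.pyGetD arr ((c : Int) + ((k : Int) - 1 - (s : Int)) * (H : Int)) 0) := by
        by_cases hsk : t = k
        · intro hcon
          have h1 := hcon.1
          have hsI : (s : Int) = (k : Int) := by omega
          rw [hsI] at h1
          have h2 : (c : Int) + ((k : Int) - 1 - (k : Int)) * (H : Int)
              = (c : Int) - (H : Int) := by ring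
          rw [h2] at h1
          have hcH : (c : Int) < (H : Int) := by exact_mod_cast hc
          omega
        · have hsklt : s < k := by omega
          have hjnat : (c : Int) + ((k : Int) - 1 - (s : Int)) * (H : Int)
              = ((c + (k - 1 - s) * H : Nat) : Int) := by
            push_cast
            have h1 : ((k - 1 - s : Nat) : Int) = (k : Int) - 1 - (s : Int) := by omega
            rw [h1]
          have hpos : c + (k - 1 - s) * H < n := by
            have := hmul (k - 1 - s) k (by omega)
            omega
          have hval : PySem.List.pyGetD arr ((c : Int) + ((k : Int) - 1 - (s : Int)) * (H : Int)) 0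
              = S.getD (k - 1 - s) 0 := by
            rw [hjnat, PySem.List.pyGetD_natCast, ← pvCls_getD arr H hH (k - 1 - s) c (by omega), hcls]
            by_cases hs0 : s = 0
            · subst hs0
              rw [if_pos rfl]
              rw [List.getD_append _ _ _ _ (by simp only [hSlen]; omega)]
            · rw [if_neg hs0]
              rw [List.getD_append _ _ _ _ (by
                simp only [List.length_take, hSlen]
                omega)]
              rw [pvGetD_take S _ _ (by omega)]
          intro hcon
          have h2 := hcon.2
          rw [hval] at h2
          have h3 : S.getD (k - 1 - s) 0 ≤ key := by
            apply hsplA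
            rw [hSlen, ← ht]
            omega
          omega
      rw [pvInnerA, if_neg hcond]
      refine ⟨arr, ?_, hlen, ?_, fun _ _ _ => rfl⟩
      · have hsI : (s : Int) = (t : Int) := by omega
        rw [hsI]
        have h0 : ((t - t : Nat) : Int) = 0 := by omega
        rw [hseq, h0, add_zero]
      · rw [hseq] at hcls
        exact hcls

-- the outer fold invariant: after processing indices [H, i), every class c is a sorted
-- permutation of its prefix followed by its untouched tail, and the swap count is the
-- total number of inversions inside the class prefixes
def pvSwapSum (a : List Int) (H i : Nat) : Int :=
  ∑ c ∈ Finset.range H, (pvInv (pvCls (a.take i) H c) : Int)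

def pvOuterInv (a : List Int) (H i : Nat) (st : List Int × Int) : Prop :=
  st.1.length = a.length ∧ st.2 = pvSwapSum a H i ∧
  ∀ c, c < H → ∃ S : List Int, S.Pairwise (· ≤ ·) ∧ S.Perm (pvCls (a.take i) H c) ∧
    pvCls st.1 H c = S ++ (pvCls a H c).drop ((pvCls (a.take i) H c).length)

def pvBodyA (h_ : Int) (st : List Int × Int) (i : Int) : List Int × Int :=
  let key := PySem.List.pyGetD st.1 i 0
  let r := pvInnerA key h_ st.1.length st.1 (i - h_) st.2
  (PySem.List.pySetD r.1 (r.2.1 + h_) key, r.2.2)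

theorem pvStepA (a : List Int) (H i : Nat) (hH : 1 ≤ H) (hHi : H ≤ i) (hin : i < a.length)
    (st : List Int × Int) (hinv : pvOuterInv a H i st) :
    pvOuterInv a H (i + 1) (pvBodyA (H : Int) st (i : Int)) := by
  obtain ⟨hlen, hsum, hcl⟩ := hinv
  have hc : i % H < H := Nat.mod_lt _ (by omega)
  have hk1 : 1 ≤ i / H := (Nat.one_le_div_iff (by omega)).mpr hHi
  have hick : i = i % H + (i / H) * H := (Nat.mod_add_div' i H).symm
  have hkle : i / H ≤ i := Nat.div_le_self i H
  obtain ⟨S, hSp, hSperm, hScls⟩ := hcl (i % H) hc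
  have hq : (pvCls (a.take i) H (i % H)).length = i / H :=
    pvCls_take_len_self a H i hH (le_of_lt hin)
  have hq1 : (pvCls (a.take (i + 1)) H (i % H)).length = i / H + 1 :=
    pvCls_take_len_self_succ a H i hH hin
  have hSlen : S.length = i / H := by rw [hSperm.length_eq, hq]
  have hkC : i / H < (pvCls a H (i % H)).length := by
    rw [pvCls_len_iff a H hH]; omega
  have hCgetD : (pvCls a H (i % H)).getD (i / H) 0 = a.getD i 0 := by
    rw [pvCls_getD a H hH (i / H) (i % H) (by omega)]
    congr 1
    all_goals omega
  have hdropC : (pvCls a H (i % H)).drop (i / H)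
      = a.getD i 0 :: (pvCls a H (i % H)).drop (i / H + 1) := by
    rw [pvDrop_eq_getD_cons _ _ hkC, hCgetD]
  -- the key A reads
  have hkey : PySem.List.pyGetD st.1 (i : Int) 0 = a.getD i 0 := by
    rw [PySem.List.pyGetD_natCast]
    have h1 : st.1.getD i 0 = (pvCls st.1 H (i % H)).getD (i / H) 0 := by
      rw [pvCls_getD st.1 H hH (i / H) (i % H) (by omega)]
      congr 1
      all_goals omega
    rw [h1, hScls, hq]
    rw [List.getD_append_right _ _ _ _ (by omega)]
    rw [hSlen, Nat.sub_self, hdropC]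
    rfl
  have hcls0 : pvCls st.1 H (i % H)
      = S ++ a.getD i 0 :: (pvCls a H (i % H)).drop (i / H + 1) := by
    rw [hScls, hq, hdropC]
  have htle : S.countP (fun x => decide (a.getD i 0 < x)) ≤ i / H := by
    rw [← hSlen]; exact List.countP_le_length
  -- run the inner loop
  have hjeq : (i : Int) - (H : Int)
      = ((i % H : Nat) : Int) + (((i / H : Nat) : Int) - 1 - ((0 : Nat) : Int)) * ((H : Nat) : Int) := by
    have h1 : ((i : Nat) : Int) = ((i % H : Nat) : Int) + ((i / H : Nat) : Int) * ((H : Nat) : Int) := by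
      exact_mod_cast congrArg (fun x : Nat => (x : Int)) hick
    rw [h1]; push_cast; ring
  obtain ⟨hsplA', hsplB'⟩ := pvSortedSplit (a.getD i 0) S hSp
  set t := S.countP (fun x => decide (a.getD i 0 < x)) with htdef
  have httle : t ≤ i / H := htle
  obtain ⟨arr', heq, hlen', hcls', hother⟩ :=
    pvInnerA_spec H (i % H) (i / H) t a.length
      (a.getD i 0) S ((pvCls a H (i % H)).drop (i / H + 1))
      hH hc hk1 hSlen hSp htdef (by omega)
      st.1.length 0 st.1 st.2 (by omega) hlen (by omega)
      (by rw [if_pos rfl]; exact hcls0)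
  have hwnat : ((i % H : Nat) : Int) + (((i / H : Nat) : Int) - 1 - ((t : Nat) : Int)) * ((H : Nat) : Int) + ((H : Nat) : Int)
      = ((i % H + (i / H - t) * H : Nat) : Int) := by
    have h2 : ((i / H - t : Nat) : Int) = ((i / H : Nat) : Int) - (t : Int) := by omega
    push_cast [h2]
    ring
  have hbody : pvBodyA (H : Int) st (i : Int)
      = (arr'.set (i % H + (i / H - t) * H) (a.getD i 0), st.2 + ((t - 0 : Nat) : Int)) := by
    simp only [pvBodyA]
    rw [hkey, hjeq, heq]
    rw [hwnat, PySem.List.pySetD_natCast]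
  rw [hbody]
  have hwlt : i % H + (i / H - t) * H < a.length := by
    have h2 : (i / H - t) * H ≤ (i / H) * H := Nat.mul_le_mul_right H (by omega)
    omega
  have hterm : pvCls (a.take (i + 1)) H (i % H) = pvCls (a.take i) H (i % H) ++ [a.getD i 0] :=
    pvCls_take_succ_same a H i hH hin
  have hclsF : pvCls (arr'.set (i % H + (i / H - t) * H) (a.getD i 0)) H (i % H)
      = (S.take (i / H - t) ++ a.getD i 0 :: S.drop (i / H - t))
        ++ (pvCls a H (i % H)).drop (i / H + 1) := by
    rw [pvCls_set_same arr' H (i % H) (i / H - t) _ hH (by rw [hlen']; exact hwlt), hcls']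
    by_cases ht0 : t = 0
    · rw [if_pos ht0, ht0]
      simp only [Nat.sub_zero]
      have h1 : (S ++ a.getD i 0 :: (pvCls a H (i % H)).drop (i / H + 1)).set (i / H) (a.getD i 0)
          = S ++ a.getD i 0 :: (pvCls a H (i % H)).drop (i / H + 1) :=
        pvSet_at_append' _ _ _ _ _ (by omega)
      rw [h1]
      have h2 : S.take (i / H) = S := List.take_of_length_le (by omega)
      have h3 : S.drop (i / H) = [] := List.drop_eq_nil_of_le (by omega)
      rw [h2, h3]
      simp
    · rw [if_neg ht0]
      have h1 : i / H + 1 - t = (i / H - t) + 1 := by omega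
      rw [h1, pvTake_succ_eq S (i / H - t) (by omega)]
      have h2 : (S.take (i / H - t) ++ [S.getD (i / H - t) 0])
            ++ (S.drop (i / H - t) ++ (pvCls a H (i % H)).drop (i / H + 1))
          = S.take (i / H - t) ++ S.getD (i / H - t) 0
            :: (S.drop (i / H - t) ++ (pvCls a H (i % H)).drop (i / H + 1)) := by
        simp
      rw [h2]
      rw [pvSet_at_append' _ _ _ _ _ (by simp [List.length_take, hSlen] <;> omega)]
      simp
  refine ⟨by simp [hlen'], ?_, ?_⟩
  · -- swap count
    have hcnt : (pvCls (a.take i) H (i % H)).countP (fun y => decide (a.getD i 0 < y)) = t := by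
      rw [← hSperm.countP_eq]
    have hsum1 : pvSwapSum a H (i + 1) = pvSwapSum a H i + (t : Int) := by
      unfold pvSwapSum
      have hsplit : ∀ c' ∈ Finset.range H,
          (pvInv (pvCls (a.take (i + 1)) H c') : Int)
            = (pvInv (pvCls (a.take i) H c') : Int) + (if c' = i % H then (t : Int) else 0) := by
        intro c' hc'
        rw [Finset.mem_range] at hc'
        by_cases hcc : c' = i % H
        · subst hcc
          rw [if_pos rfl, hterm, pvInv_concat, hcnt]
          push_cast; ring
        · rw [if_neg hcc, pvCls_take_succ_other a H c' i hH hc' (fun he => hcc he.symm)]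
          ring
      rw [Finset.sum_congr rfl hsplit, Finset.sum_add_distrib,
        Finset.sum_ite_eq' (Finset.range H) (i % H)]
      rw [if_pos (Finset.mem_range.mpr hc)]
    show st.2 + ((t - 0 : Nat) : Int) = pvSwapSum a H (i + 1)
    rw [hsum1, hsum]
    simp
  · -- per-class invariant
    intro c' hc'
    by_cases hcc : c' = i % H
    · subst hcc
      refine ⟨S.take (i / H - t) ++ a.getD i 0 :: S.drop (i / H - t), ?_, ?_, ?_⟩
      · rw [List.pairwise_append]
        refine ⟨hSp.sublist (List.take_sublist _ _), ?_, ?_⟩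
        · rw [List.pairwise_cons]
          refine ⟨?_, hSp.sublist (List.drop_sublist _ _)⟩
          intro y hy
          obtain ⟨j, hj, rfl⟩ := List.mem_iff_getElem.mp hy
          rw [List.getElem_drop]
          have hjlen : i / H - t + j < S.length := by
            rw [List.length_drop] at hj
            omega
          have hlt := hsplB' (i / H - t + j) (by omega) (by omega)
          rw [List.getD_eq_getElem _ 0 hjlen] at hlt
          exact le_of_lt hlt
        · intro x hx y hy
          obtain ⟨j, hj, rfl⟩ := List.mem_iff_getElem.mp hx
          rw [List.getElem_take]
          have hjlen : j < S.length := by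
            rw [List.length_take] at hj
            omega
          have hjlt : j < S.length - t := by
            rw [List.length_take] at hj
            omega
          have hle := hsplA' j (by omega)
          rw [List.getD_eq_getElem _ 0 hjlen] at hle
          rcases List.mem_cons.mp hy with h | h
          · omega
          · obtain ⟨j2, hj2, rfl⟩ := List.mem_iff_getElem.mp h
            rw [List.getElem_drop]
            have hj2len : i / H - t + j2 < S.length := by
              rw [List.length_drop] at hj2
              omega
            have hlt2 := hsplB' (i / H - t + j2) (by omega) (by omega)
            rw [List.getD_eq_getElem _ 0 hj2len] at hlt2
            omega
      · rw [hterm]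
        have hp1 : (S.take (i / H - t) ++ a.getD i 0 :: S.drop (i / H - t)).Perm
            (a.getD i 0 :: S) := by
          have hmid := List.perm_middle (a := a.getD i 0)
            (l₁ := S.take (i / H - t)) (l₂ := S.drop (i / H - t))
          simpa [List.take_append_drop] using hmid
        exact hp1.trans ((hSperm.cons _).trans (List.perm_append_singleton _ _).symm)
      · rw [hq1, hclsF]
    · obtain ⟨S2, h2p, h2perm, h2cls⟩ := hcl c' hc'
      have hto := pvCls_take_succ_other a H c' i hH hc' (fun he => hcc he.symm)
      refine ⟨S2, h2p, ?_, ?_⟩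
      · rw [hto]; exact h2perm
      · rw [hto]
        rw [pvCls_set_other arr' H c' _ _ hH hc'
          (by rw [Nat.add_mul_mod_self_right, Nat.mod_eq_of_lt hc]; exact fun he => hcc he.symm)]
        rw [hother c' hc' hcc]
        exact h2cls

theorem pvPyRange_nil (a b : Int) (h : b ≤ a) : PySem.List.pyRange a b 1 = [] := by
  simp [PySem.List.pyRange]
  omega

theorem pvSet_getD_self (l : List Int) (p : Nat) (hp : p < l.length) :
    l.set p (l.getD p 0) = l := by
  apply pvListExt
  · simp
  · intro q hq
    rw [List.length_set] at hq
    rw [pvGetD_set l p q _ hp]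
    split
    next h => rw [h]
    next => rfl

theorem pvOuterBase (a : List Int) (H : Nat) (hH : 1 ≤ H) (hHn : H ≤ a.length) :
    pvOuterInv a H H (a, 0) := by
  have hcls1 : ∀ c, c < H → pvCls (a.take H) H c = [a.getD c 0] := by
    intro c hc
    rw [pvCls_cons _ H c hH (by rw [List.length_take]; omega),
      pvCls_nil _ H (c + H) (by rw [List.length_take]; omega),
      pvGetD_take a H c hc]
  refine ⟨rfl, ?_, ?_⟩
  · show (0 : Int) = pvSwapSum a H H
    unfold pvSwapSum
    symm
    apply Finset.sum_eq_zero
    intro c hcr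
    rw [Finset.mem_range] at hcr
    rw [hcls1 c hcr]
    simp [pvInv]
  · intro c hc
    refine ⟨[a.getD c 0], by simp, by rw [hcls1 c hc], ?_⟩
    rw [hcls1 c hc]
    show pvCls a H c = [a.getD c 0] ++ (pvCls a H c).drop 1
    rw [pvCls_cons a H c hH (by omega)]
    simp

theorem pvFoldA (a : List Int) (H : Nat) (hH : 1 ≤ H) (hHn : H ≤ a.length) :
    ∀ N, H ≤ N → N ≤ a.length →
    pvOuterInv a H N ((PySem.List.pyRange (H : Int) (N : Int) 1).foldl (pvBodyA (H : Int)) (a, 0)) := by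
  intro N hN
  induction N, hN using Nat.le_induction with
  | base =>
    intro _
    rw [pvPyRange_nil _ _ (le_refl _)]
    exact pvOuterBase a H hH hHn
  | succ N hN ih =>
    intro hlen
    have hr : PySem.List.pyRange (H : Int) ((N + 1 : Nat) : Int) 1
        = PySem.List.pyRange (H : Int) (N : Int) 1 ++ [(N : Int)] := by
      have h1 : ((N + 1 : Nat) : Int) = (N : Int) + 1 := by push_cast; ring
      rw [h1]
      exact PySem.List.pyRange_one_succ_right (by exact_mod_cast hN)
    rw [hr, List.foldl_append]
    simp only [List.foldl_cons, List.foldl_nil]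
    exact pvStepA a H N hH hN (by omega) _ (ih (by omega))

-- generic map-over-range access helpers
theorem pvGetD_map_range {α : Type} (f : Nat → α) (d : α) (w c : Nat) (hc : c < w) :
    ((List.range w).map f).getD c d = f c := by
  rw [List.getD_eq_getElem _ _ (by simpa using hc)]
  simp

theorem pvSet_map_range {α : Type} (f : Nat → α) (w c : Nat) (v : α) :
    ((List.range w).map f).set c v
      = (List.range w).map (fun x => if x = c then v else f x) := by
  apply List.ext_getElem (by simp)
  intro p h1 h2
  rw [List.getElem_set]
  simp only [List.getElem_map, List.getElem_range]
  simp only [List.length_set, List.length_map, List.length_range] at h1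
  split
  · rw [if_pos (by omega)]
  · rw [if_neg (by omega)]

theorem pvMap_getD_range (a : List Int) :
    (List.range a.length).map (fun i => a.getD i 0) = a := by
  apply List.ext_getElem (by simp)
  intro p h1 h2
  simp only [List.getElem_map, List.getElem_range]
  rw [List.getD_eq_getElem _ 0 h2]

theorem pvSortCnt_singleton (x : Int) : pvSortCnt [x] = ([x], 0) := by
  rw [pvSortCnt]
  simp

theorem pvBuckets (a : List Int) (w : Nat) (hw : 1 ≤ w) :
    ∀ i, i ≤ a.length →
    (List.range i).foldl (fun bs j => bs.set (j % w) (bs.getD (j % w) [] ++ [a.getD j 0]))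
        (List.replicate w ([] : List Int))
      = (List.range w).map (fun c => pvCls (a.take i) w c) := by
  intro i
  induction i with
  | zero =>
    intro _
    simp only [List.range_zero, List.foldl_nil, List.take_zero]
    apply List.ext_getElem (by simp)
    intro p h1 h2
    simp only [List.getElem_replicate, List.getElem_map, List.getElem_range]
    rw [pvCls_nil _ w _ (by simp)]
  | succ i ih =>
    intro hi
    rw [List.range_succ, List.foldl_append]
    rw [ih (by omega)]
    simp only [List.foldl_cons, List.foldl_nil]
    have hiw : i % w < w := Nat.mod_lt _ (by omega)
    rw [pvGetD_map_range _ _ w _ hiw, pvSet_map_range]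
    apply List.map_congr_left
    intro x hx
    rw [List.mem_range] at hx
    by_cases hxc : x = i % w
    · subst hxc
      rw [if_pos rfl, pvCls_take_succ_same a w i hw (by omega)]
    · rw [if_neg hxc, pvCls_take_succ_other a w x i hw hx (fun he => hxc he.symm)]

theorem pvSortFold (a : List Int) (w : Nat) :
    ∀ k, k ≤ w →
    (List.range k).foldl
        (fun st j =>
          (st.1.set j (pvSortCnt (st.1.getD j [])).1, st.2 + (pvSortCnt (st.1.getD j [])).2))
        ((List.range w).map (fun c => pvCls a w c), 0)
      = ((List.range w).map (fun c => if c < k then (pvSortCnt (pvCls a w c)).1 else pvCls a w c),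
          ∑ c ∈ Finset.range k, (pvSortCnt (pvCls a w c)).2) := by
  intro k
  induction k with
  | zero =>
    intro _
    simp only [List.range_zero, List.foldl_nil, Finset.range_zero, Finset.sum_empty]
    simp only [Prod.mk.injEq]
    refine ⟨?_, trivial⟩
    symm
    apply List.map_congr_left
    intro x _
    rw [if_neg (by omega)]
  | succ k ih =>
    intro hk
    rw [List.range_succ, List.foldl_append]
    rw [ih (by omega)]
    simp only [List.foldl_cons, List.foldl_nil]
    rw [pvGetD_map_range _ _ w _ (by omega)]
    rw [if_neg (by omega)]
    rw [pvSet_map_range]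
    simp only [Prod.mk.injEq]
    constructor
    · apply List.map_congr_left
      intro x hx
      rw [List.mem_range] at hx
      by_cases hxk : x = k
      · subst hxk
        rw [if_pos rfl, if_pos (by omega)]
      · rw [if_neg hxk]
        by_cases hxk2 : x < k
        · rw [if_pos hxk2, if_pos (by omega)]
        · rw [if_neg hxk2, if_neg (by omega)]
    · rw [Finset.sum_range_succ]

-- h = 0: A's pass re-writes every element in place and counts nothing
theorem pvA_id (a : List Int) : ∀ is : List Int, (∀ i ∈ is, 0 ≤ i ∧ i < (a.length : Int)) →
    is.foldl (pvBodyA 0) (a, 0) = (a, 0) := by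
  intro is
  induction is with
  | nil => intro _; rfl
  | cons i is ih =>
    intro hmem
    obtain ⟨hge, hlt⟩ := hmem i List.mem_cons_self
    have hstep : pvBodyA 0 (a, 0) i = (a, 0) := by
      obtain ⟨j, hj, rfl⟩ : ∃ j : Nat, j < a.length ∧ i = (j : Int) :=
        ⟨i.toNat, by omega, by omega⟩
      obtain ⟨m, hm⟩ : ∃ m, a.length = m + 1 := ⟨a.length - 1, by omega⟩
      have hj0 : (j : Int) - 0 = (j : Int) := by ring
      have hinner : pvInnerA (PySem.List.pyGetD a (j : Int) 0) 0 a.length a ((j : Int) - 0) 0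
          = (a, (j : Int) - 0, 0) := by
        rw [hj0, hm, pvInnerA, if_neg (fun hcon => lt_irrefl _ hcon.2)]
      simp only [pvBodyA, hinner]
      have h2 : ((j : Int) - 0) + 0 = (j : Int) := by ring
      rw [h2, PySem.List.pyGetD_natCast, PySem.List.pySetD_natCast, pvSet_getD_self a j hj]
    rw [List.foldl_cons, hstep]
    exact ih (fun x hx => hmem x (List.mem_cons_of_mem _ hx))

-- B evaluated in the main case 1 ≤ H ≤ |a|
theorem pvB_main (a : List Int) (H : Nat) (hH : 1 ≤ H) (hn : H ≤ a.length) :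
    hInsertionSort_alt a (H : Int) =
      ((List.range a.length).map (fun p =>
          ((pvSortCnt (pvCls a H (p % H))).1).getD (p / H) 0),
        ∑ c ∈ Finset.range H, (pvSortCnt (pvCls a H c)).2) := by
  rw [hInsertionSort_alt, if_neg (by omega)]
  simp only [Int.toNat_natCast, min_eq_left hn]
  rw [pvBuckets a H hH a.length (le_refl _), List.take_length]
  rw [pvSortFold a H H (le_refl _)]
  simp only [Prod.mk.injEq]
  constructor
  · apply List.map_congr_left
    intro p hp
    rw [List.mem_range] at hp
    rw [pvGetD_map_range _ _ H _ (Nat.mod_lt _ (by omega))]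
    rw [if_pos (Nat.mod_lt _ (by omega))]
  · trivial

-- the main case: A's gapped insertion sort equals per-class merge sort with counts
theorem pvMain (a : List Int) (H : Nat) (hH : 1 ≤ H) (hn : H ≤ a.length) :
    hInsertionSort a (H : Int) = hInsertionSort_alt a (H : Int) := by
  have hfold := pvFoldA a H hH hn a.length hn (le_refl _)
  obtain ⟨hlen, hsum, hcl⟩ := hfold
  simp only [List.take_length] at hsum hcl
  have hA : hInsertionSort a (H : Int)
      = (PySem.List.pyRange (H : Int) ((a.length : Nat) : Int) 1).foldl (pvBodyA (H : Int)) (a, 0) :=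
    rfl
  rw [pvB_main a H hH hn, hA]
  apply Prod.ext
  · -- the array
    apply pvListExt
    · rw [hlen]; simp
    · intro p hp
      rw [hlen] at hp
      have hpH : p % H < H := Nat.mod_lt _ (by omega)
      have hpd : p % H + (p / H) * H = p := Nat.mod_add_div' p H
      obtain ⟨S, hSp, hSperm, hScls⟩ := hcl (p % H) hpH
      rw [List.drop_length, List.append_nil] at hScls
      obtain ⟨q1, q2, q3⟩ := pvSortCnt_spec (pvCls a H (p % H))
      have hSeq : S = (pvSortCnt (pvCls a H (p % H))).1 :=
        List.Perm.eq_of_pairwise (fun x y _ _ hxy hyx => le_antisymm hxy hyx)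
          hSp q1 (hSperm.trans q2.symm)
      show (PySem.List.pyRange _ _ 1).foldl (pvBodyA _) (a, 0) |>.1.getD p 0 = _
      rw [pvGetD_map_range _ _ a.length _ hp]
      have h1 : ((PySem.List.pyRange (H : Int) ((a.length : Nat) : Int) 1).foldl
            (pvBodyA (H : Int)) (a, 0)).1.getD p 0
          = (pvCls ((PySem.List.pyRange (H : Int) ((a.length : Nat) : Int) 1).foldl
              (pvBodyA (H : Int)) (a, 0)).1 H (p % H)).getD (p / H) 0 := by
        rw [pvCls_getD _ H hH (p / H) (p % H) (by rw [hlen]; omega)]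
        congr 1
        all_goals omega
      rw [h1, hScls, hSeq]
  · -- the swap count
    show ((PySem.List.pyRange _ _ 1).foldl (pvBodyA _) (a, 0)).2 = _
    rw [hsum]
    unfold pvSwapSum
    simp only [List.take_length]
    apply Finset.sum_congr rfl
    intro c _
    rw [(pvSortCnt_spec (pvCls a H c)).2.2]

-- the degenerate case H > |a|: both sides return (a, 0)
theorem pvBig (a : List Int) (H : Nat) (hH : 1 ≤ H) (hn : a.length < H) :
    hInsertionSort a (H : Int) = (a, 0) ∧ hInsertionSort_alt a (H : Int) = (a, 0) := by
  constructor
  · have hA : hInsertionSort a (H : Int)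
        = (PySem.List.pyRange (H : Int) ((a.length : Nat) : Int) 1).foldl
            (pvBodyA (H : Int)) (a, 0) := rfl
    rw [hA, pvPyRange_nil _ _ (by exact_mod_cast le_of_lt hn)]
    rfl
  · by_cases hz : a.length = 0
    · have ha : a = [] := List.eq_nil_of_length_eq_zero hz
      subst ha
      rw [hInsertionSort_alt, if_neg (by omega)]
      simp
    · rw [hInsertionSort_alt, if_neg (by omega)]
      simp only [Int.toNat_natCast, min_eq_right (le_of_lt hn)]
      rw [pvBuckets a a.length (by omega) a.length (le_refl _), List.take_length]
      rw [pvSortFold a a.length a.length (le_refl _)]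
      have hsingle : ∀ c, c < a.length → pvCls a a.length c = [a.getD c 0] := by
        intro c hc
        rw [pvCls_cons a _ c (by omega) hc, pvCls_nil a _ _ (by omega)]
      simp only [Prod.mk.injEq]
      constructor
      · have hmap : (List.range a.length).map (fun p =>
              ((((List.range a.length).map (fun c =>
                  if c < a.length then (pvSortCnt (pvCls a a.length c)).1
                  else pvCls a a.length c)).getD (p % a.length) []).getD (p / a.length) 0))
            = (List.range a.length).map (fun p => a.getD p 0) := by
          apply List.map_congr_left
          intro p hp
          rw [List.mem_range] at hp
          rw [Nat.mod_eq_of_lt hp, Nat.div_eq_of_lt hp]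
          rw [pvGetD_map_range _ _ a.length _ hp, if_pos hp, hsingle p hp,
            pvSortCnt_singleton]
          rfl
        rw [hmap, pvMap_getD_range]
      · apply Finset.sum_eq_zero
        intro c hc
        rw [Finset.mem_range] at hc
        rw [hsingle c hc, pvSortCnt_singleton]

-- ===== VERDICT (by name: the statement is the Claim_ definition above) =====
theorem hInsertionSort_spec : Claim_equal_hInsertionSort := by
  unfold Claim_equal_hInsertionSort
  intro a h_ _ hpre
  unfold Spec_hInsertionSort
  unfold Pre_hInsertionSort at hpre
  by_cases h0 : h_ < 1
  · have h00 : h_ = 0 := by omega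
    subst h00
    have hB : hInsertionSort_alt a 0 = (a, 0) := by
      rw [hInsertionSort_alt, if_pos (by norm_num)]
    have hA : hInsertionSort a 0
        = (PySem.List.pyRange 0 ((a.length : Nat) : Int) 1).foldl (pvBodyA 0) (a, 0) := rfl
    rw [hA, hB]
    apply pvA_id
    intro i hi
    rw [PySem.List.mem_pyRange_one] at hi
    exact hi
  · have hH : 1 ≤ h_.toNat := by omega
    have hcast : ((h_.toNat : Nat) : Int) = h_ := Int.toNat_of_nonneg (by omega)
    rw [← hcast]
    by_cases hn : h_.toNat ≤ a.length
    · exact pvMain a h_.toNat hH hn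
    · obtain ⟨hA, hB⟩ := pvBig a h_.toNat hH (by omega)
      rw [hA, hB]
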